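-- pv_equiv track=rewrite | github.com/daniel-reich/turbo-robot | AvP94XqJvPjoMk5PT_20.py | unique_styles
-- ===== SOURCE A (Python) =====
-- def unique_styles(albums):
--     lista = []
--     lista2 = []
--     x = [element for element in albums]
--     for letter in x:
--         for let in letter:
--             lista.append(let)
--         lista.append(',')
--     joined = ''.join(lista)
--     splitedjoined = joined.split(",")
--     return len(set(splitedjoined[0:-1]))
-- ===== SOURCE B (Python) =====
-- def unique_styles(albums):
--     return len({s for album in albums for s in "".join(album).split(",")})
-- ===== Notes on version B (the rewrite author's own statement) =====
-- stated objective: simpler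
-- what changed: B drops A's build-one-big-string-with-comma-sentinels, single split and trailing-slice pass, and instead splits each album on commas directly and collects the pieces into one set comprehension.
import Mathlib
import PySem

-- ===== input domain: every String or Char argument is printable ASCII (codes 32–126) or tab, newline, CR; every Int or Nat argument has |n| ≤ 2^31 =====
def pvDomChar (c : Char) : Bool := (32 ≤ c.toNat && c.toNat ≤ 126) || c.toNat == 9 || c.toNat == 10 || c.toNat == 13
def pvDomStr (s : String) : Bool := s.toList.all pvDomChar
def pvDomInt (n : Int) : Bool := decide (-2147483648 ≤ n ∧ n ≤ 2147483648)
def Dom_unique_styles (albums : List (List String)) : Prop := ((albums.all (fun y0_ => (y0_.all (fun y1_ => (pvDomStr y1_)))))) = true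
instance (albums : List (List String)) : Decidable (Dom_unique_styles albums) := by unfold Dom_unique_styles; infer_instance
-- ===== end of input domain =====

-- B replaces A's build-one-big-string-then-split-once pass by a per-album split collected
-- straight into a set (objective: simpler).

-- ===== PORT A =====
-- literal port of A: copy the list, append every style then a ',' sentinel, join,
-- split once on ',', drop the trailing empty piece, count the set.
-- (A's 'lista2' is created and never used; it is omitted as it has no effect on the result.)
def unique_styles (albums : List (List String)) : Int :=
  let lista : List String := []
  let x := albums.map (fun element => element)
  let lista := x.foldl (fun lista letter =>
      (letter.foldl (fun lista l => lista ++ [l]) lista) ++ [","]) lista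
  let joined := PySem.Str.join "" lista
  let splitedjoined := (PySem.Str.split? joined ",").getD []   -- sep is the literal ",", never empty: split? is always some
  PySem.Set.len (PySem.Set.ofList (PySem.List.slice splitedjoined (some 0) (some (-1))))

-- ===== PORT B =====
-- literal port of B: len({s for album in albums for s in "".join(album).split(",")})
def unique_styles_alt (albums : List (List String)) : Int :=
  PySem.Set.len (PySem.Set.ofList
    (albums.flatMap (fun album =>
      (PySem.Str.split? (PySem.Str.join "" album) ",").getD [])))

-- ===== PRECONDITION & SPEC =====
def Spec_unique_styles (albums : List (List String)) (out : Int) : Prop := out = unique_styles_alt albums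
instance (albums : List (List String)) (out : Int) : Decidable (Spec_unique_styles albums out) := by unfold Spec_unique_styles; infer_instance

-- ===== CLAIM (what is proved, stated in full; the proofs are below) =====
def Claim_equal_unique_styles : Prop := ∀ (albums : List (List String)), Dom_unique_styles albums → Spec_unique_styles albums (unique_styles albums)

-- ===== LEMMAS AND PROOFS =====

-- comma-splitting of a character list, in the direct structural form
def split1 : List Char → List (List Char)
  | [] => [[]]
  | c :: r => if c = ',' then [] :: split1 r else
      match split1 r with
      | [] => [[c]]
      | p :: ps => (c :: p) :: ps

theorem split1_ne_nil (l : List Char) : split1 l ≠ [] := by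
  cases l with
  | nil => simp [split1]
  | cons c r =>
    simp only [split1]
    split_ifs
    · simp
    · cases h : split1 r <;> simp

theorem go_eq_split1 : ∀ (fuel : Nat) (l cur : List Char) (acc : List (List Char)), l.length < fuel →
    PySem.Chars.splitOn.go [','] fuel l cur acc =
      acc.reverse ++ (match split1 l with
        | [] => []
        | p :: ps => (cur.reverse ++ p) :: ps) := by
  intro fuel
  induction fuel with
  | zero => intro l cur acc h; omega
  | succ n ih =>
    intro l cur acc h
    cases l with
    | nil => simp [PySem.Chars.splitOn.go, split1]
    | cons c rest =>
      by_cases hc : c = ','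
      · subst hc
        rw [PySem.Chars.splitOn.go]
        rw [if_pos (by simp)]
        norm_num
        rw [ih rest [] (cur.reverse :: acc) (by simp at h; omega)]
        cases hs : split1 rest with
        | nil => exact absurd hs (split1_ne_nil rest)
        | cons p ps => simp [split1, hs]
      · rw [PySem.Chars.splitOn.go]
        rw [if_neg (by simp [List.isPrefixOf]; intro hh; exact hc hh.symm)]
        rw [ih rest (c :: cur) acc (by simp at h ⊢; omega)]
        cases hs : split1 rest with
        | nil => exact absurd hs (split1_ne_nil rest)
        | cons p ps => simp [split1, hs, hc]

theorem splitOn_eq_split1 (l : List Char) : PySem.Chars.splitOn l [','] = split1 l := by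
  rw [PySem.Chars.splitOn, go_eq_split1 _ _ _ _ (by omega)]
  cases hs : split1 l with
  | nil => exact absurd hs (split1_ne_nil l)
  | cons p ps => simp

theorem split1_append (a b : List Char) :
    split1 (a ++ ',' :: b) = split1 a ++ split1 b := by
  induction a with
  | nil => simp [split1]
  | cons c r ih =>
    by_cases hc : c = ','
    · subst hc; simp [split1, ih]
    · simp only [List.cons_append, split1, if_neg hc, ih]
      cases hs : split1 r with
      | nil => exact absurd hs (split1_ne_nil r)
      | cons p ps => simp

theorem join_nil_eq_flatten (parts : List (List Char)) :
    PySem.Chars.join [] parts = parts.flatten := by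
  induction parts with
  | nil => simp [PySem.Chars.join_nil]
  | cons p rest ih =>
    cases rest with
    | nil => simp [PySem.Chars.join_singleton]
    | cons q r => rw [PySem.Chars.join_cons_cons]; simp_all

-- A's accumulation loop builds exactly "each album's styles then a comma", flattened
theorem lista_eq (albums : List (List String)) : ∀ (acc : List String),
    albums.foldl (fun lista letter => lista ++ letter ++ [","]) acc
      = acc ++ albums.flatMap (fun al => al ++ [","]) := by
  induction albums with
  | nil => simp
  | cons al rest ih =>
    intro acc
    simp only [List.foldl_cons, List.flatMap_cons, ih]
    simp

-- splitting the joined string = the per-album splits, plus one trailing empty piece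
theorem split1_flatten (L : List (List (List Char))) :
    split1 ((L.map (fun al => al.flatten ++ [','])).flatten)
      = (L.map (fun al => split1 al.flatten)).flatten ++ [[]] := by
  induction L with
  | nil => simp [split1]
  | cons al rest ih =>
    simp only [List.map_cons, List.flatten_cons, List.append_assoc, List.singleton_append]
    rw [split1_append, ih]

theorem unique_styles_eq_lists (albums : List (List String)) :
    PySem.List.slice ((PySem.Str.split?
        (PySem.Str.join "" (albums.foldl (fun lista letter =>
          (letter.foldl (fun lista l => lista ++ [l]) lista) ++ [","]) [])) ",").getD [])
        (some 0) (some (-1))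
      = albums.flatMap (fun album =>
          (PySem.Str.split? (PySem.Str.join "" album) ",").getD []) := by
  simp only [PySem.List.foldl_append_singleton]
  rw [lista_eq albums []]
  simp only [List.nil_append]
  rw [PySem.List.slice_zero_start, PySem.List.slice_to_neg_one]
  simp only [PySem.Str.split?, PySem.Chars.split?, PySem.Str.toList_join]
  have hsep : ("," : String).toList = [','] := rfl
  have hnil : ("" : String).toList = [] := rfl
  simp only [hsep, hnil, splitOn_eq_split1, join_nil_eq_flatten, List.isEmpty_cons,
    if_neg (by simp : ¬(false = true)), Option.map_some, Option.getD_some]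
  rw [show (List.map String.toList (albums.flatMap fun al => al ++ [","])).flatten
        = ((albums.map (List.map String.toList)).map (fun al => al.flatten ++ [','])).flatten
      by induction albums with
         | nil => rfl
         | cons a r ih => simp [List.flatMap_def, List.map_flatten, List.map_map,
             Function.comp_def] at ih ⊢; simp [ih]]
  rw [split1_flatten]
  simp [List.flatMap_def, List.map_flatten, List.map_map, Function.comp_def]

-- ===== VERDICT (by name: the statement is the Claim_ definition above) =====
theorem unique_styles_spec : Claim_equal_unique_styles := by
  intro albums _
  unfold Spec_unique_styles unique_styles unique_styles_alt
  dsimp only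
  rw [show List.map (fun element => element) albums = albums from by simp]
  rw [unique_styles_eq_lists albums]
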